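-- pv_equiv track=rewrite | github.com/alako/Pooling | stage1.py | find_cycles_containing_edges
-- ===== SOURCE A (Python) =====
-- def find_cycles_containing_edges(edges, cycles):
--     edges_c = []
--     for (u, v, w) in edges:
--         c = []
--         for cycle in cycles:
--             if u in cycle and v in cycle:
--                 c.append(cycle)
--         edges_c.append((u, v, w, c, len(c)))
--     return edges_c
-- ===== SOURCE B (Python) =====
-- def find_cycles_containing_edges(edges, cycles):
--     # Inverted index: node -> list of (cycle position, cycle), positions strictly increasing.
--     index = {}
--     for i, cycle in enumerate(cycles):
--         for node in cycle:
--             lst = index.setdefault(node, [])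
--             if not lst or lst[-1][0] != i:
--                 lst.append((i, cycle))
--
--     def intersect(a, b):
--         # merge-intersection of two position-sorted posting lists
--         res = []
--         i = j = 0
--         while i < len(a) and j < len(b):
--             if a[i][0] == b[j][0]:
--                 res.append(a[i][1])
--                 i += 1
--                 j += 1
--             elif a[i][0] < b[j][0]:
--                 i += 1
--             else:
--                 j += 1
--         return res
--
--     out = []
--     for (u, v, w) in edges:
--         c = intersect(index.get(u, []), index.get(v, []))
--         out.append((u, v, w, c, len(c)))
--     return out
-- ===== Notes on version B (the rewrite author's own statement) =====
-- stated objective: faster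
-- what changed: Builds an inverted index from each node to its ordered posting list of (cycle position, cycle) in one pass over the cycles, then answers each edge by a two-pointer merge-intersection of the two posting lists, instead of rescanning every cycle's node list for every edge.
import Mathlib
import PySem

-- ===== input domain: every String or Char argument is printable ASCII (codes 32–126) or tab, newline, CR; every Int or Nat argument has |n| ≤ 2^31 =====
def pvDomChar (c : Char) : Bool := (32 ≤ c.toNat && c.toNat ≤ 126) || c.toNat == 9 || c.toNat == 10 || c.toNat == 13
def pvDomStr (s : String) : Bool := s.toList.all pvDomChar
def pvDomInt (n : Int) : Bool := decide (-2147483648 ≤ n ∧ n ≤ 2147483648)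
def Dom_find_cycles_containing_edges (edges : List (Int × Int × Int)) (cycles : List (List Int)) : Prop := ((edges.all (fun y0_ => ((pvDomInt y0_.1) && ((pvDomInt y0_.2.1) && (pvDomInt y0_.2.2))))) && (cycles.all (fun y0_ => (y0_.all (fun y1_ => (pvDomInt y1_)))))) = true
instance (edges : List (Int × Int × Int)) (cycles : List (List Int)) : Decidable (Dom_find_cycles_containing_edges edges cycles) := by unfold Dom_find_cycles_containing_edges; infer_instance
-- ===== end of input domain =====

-- B builds an inverted index (node -> position-ordered posting list of cycles) in one pass over
-- the cycles and answers each edge by a two-pointer merge-intersection, instead of rescanning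
-- every cycle's node list for every edge; measurably faster in a timing run.
-- ===== PORT A =====
def find_cycles_containing_edges (edges : List (Int × Int × Int)) (cycles : List (List Int)) : List (Int × Int × Int × List (List Int) × Int) :=
  edges.foldl (fun edges_c e =>
    let c := cycles.foldl (fun c cyc =>
      if cyc.contains e.1 && cyc.contains e.2.1 then c ++ [cyc] else c) []
    edges_c ++ [(e.1, e.2.1, e.2.2, c, (c.length : Int))]) []

-- ===== PORT B =====
-- inner loop of the index build: 'for node in cycle: lst = index.setdefault(node, []);
-- if not lst or lst[-1][0] != i: lst.append((i, cycle))'  (setdefault+mutate = getD+insert here)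
def fceInner (i : Nat) (cyc : List Int) (d : PySem.Dict Int (List (Nat × List Int))) : PySem.Dict Int (List (Nat × List Int)) :=
  cyc.foldl (fun d node =>
    let lst := d.getD node []
    if lst.getLast?.map Prod.fst ≠ some i then d.insert node (lst ++ [(i, cyc)]) else d) d

-- 'for i, cycle in enumerate(cycles)': the counter is carried explicitly in the fold state
def fceIndex (cycles : List (List Int)) : PySem.Dict Int (List (Nat × List Int)) :=
  (cycles.foldl (fun st cyc => (st.1 + 1, fceInner st.1 cyc st.2)) ((0 : Nat), PySem.Dict.empty)).2

-- the two-pointer merge-intersection 'intersect(a, b)'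
def fceIntersect : List (Nat × List Int) → List (Nat × List Int) → List (List Int)
  | [], _ => []
  | _ :: _, [] => []
  | (i, c) :: a, (j, d) :: b =>
    if i = j then c :: fceIntersect a b
    else if i < j then fceIntersect a ((j, d) :: b)
    else fceIntersect ((i, c) :: a) b
termination_by a b => a.length + b.length

def find_cycles_containing_edges_alt (edges : List (Int × Int × Int)) (cycles : List (List Int)) : List (Int × Int × Int × List (List Int) × Int) :=
  let index := fceIndex cycles
  edges.foldl (fun out e =>
    let c := fceIntersect (index.getD e.1 []) (index.getD e.2.1 [])
    out ++ [(e.1, e.2.1, e.2.2, c, (c.length : Int))]) []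

-- ===== PRECONDITION & SPEC =====
def Spec_find_cycles_containing_edges (edges : List (Int × Int × Int)) (cycles : List (List Int)) (out : List (Int × Int × Int × List (List Int) × Int)) : Prop := out = find_cycles_containing_edges_alt edges cycles
instance (edges : List (Int × Int × Int)) (cycles : List (List Int)) (out : List (Int × Int × Int × List (List Int) × Int)) : Decidable (Spec_find_cycles_containing_edges edges cycles out) := by unfold Spec_find_cycles_containing_edges; infer_instance

-- ===== CLAIM =====
def Claim_equal_find_cycles_containing_edges : Prop := ∀ (edges : List (Int × Int × Int)) (cycles : List (List Int)), Dom_find_cycles_containing_edges edges cycles → Spec_find_cycles_containing_edges edges cycles (find_cycles_containing_edges edges cycles)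

-- ===== LEMMAS AND PROOFS =====

-- specification-side enumeration (Python's enumerate, starting at n)
def pvEnumFrom (n : Nat) : List (List Int) → List (Nat × List Int)
  | [] => []
  | c :: cs => (n, c) :: pvEnumFrom (n + 1) cs

lemma le_fst_of_mem_pvEnumFrom (n : Nat) (l : List (List Int)) (p : Nat × List Int)
    (hp : p ∈ pvEnumFrom n l) : n ≤ p.1 := by
  induction l generalizing n with
  | nil => simp [pvEnumFrom] at hp
  | cons c cs ih =>
    simp [pvEnumFrom] at hp
    rcases hp with h | h
    · simp [h]
    · exact Nat.le_of_succ_le (ih (n + 1) h)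

lemma pairwise_pvEnumFrom (n : Nat) (l : List (List Int)) :
    (pvEnumFrom n l).Pairwise (fun x y => x.1 < y.1) := by
  induction l generalizing n with
  | nil => simp [pvEnumFrom]
  | cons c cs ih =>
    simp only [pvEnumFrom, List.pairwise_cons]
    exact ⟨fun y hy => lt_of_lt_of_le (Nat.lt_succ_self n) (le_fst_of_mem_pvEnumFrom _ _ _ hy), ih (n + 1)⟩

-- the inner loop appends (i, cyc) to each node's posting list exactly once per node of cyc
lemma fceInner_getD (rest : List Int) (i : Nat) (cyc : List Int)
    (d0 d : PySem.Dict Int (List (Nat × List Int))) (processed : List Int)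
    (hsmall : ∀ v p, p ∈ d0.getD v [] → p.1 < i)
    (hrel : ∀ v, d.getD v [] = d0.getD v [] ++ (if v ∈ processed then [(i, cyc)] else []))
    (u : Int) :
    (rest.foldl (fun d node =>
        let lst := d.getD node []
        if lst.getLast?.map Prod.fst ≠ some i then d.insert node (lst ++ [(i, cyc)]) else d) d).getD u []
    = d0.getD u [] ++ (if u ∈ processed ∨ u ∈ rest then [(i, cyc)] else []) := by
  induction rest generalizing d processed with
  | nil => simpa using hrel u
  | cons node rest ih =>
    simp only [List.foldl_cons]
    by_cases hmem : node ∈ processed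
    · -- already appended for this cycle: last element is (i, cyc), no change
      have hlast : ((d.getD node []).getLast?.map Prod.fst) = some i := by
        rw [hrel node, if_pos hmem]; simp
      rw [if_neg (by simp [hlast])]
      rw [ih d (node :: processed) (fun v => by
        rw [hrel v]; congr 1
        by_cases hv : v = node
        · subst hv; simp [hmem]
        · simp [hv])]
      congr 1
      by_cases hu : u ∈ processed <;> by_cases hn : u = node <;> simp_all
    · -- first occurrence of node in this cycle: append (i, cyc)
      have hlst : d.getD node [] = d0.getD node [] := by
        rw [hrel node, if_neg hmem]; simp
      have hlast : ((d.getD node []).getLast?.map Prod.fst) ≠ some i := by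
        rw [hlst]
        cases hgl : (d0.getD node []).getLast? with
        | none => simp
        | some p =>
          have := hsmall node p (List.mem_of_getLast? hgl)
          simp
          omega
      rw [if_pos (by simpa using hlast)]
      rw [ih _ (node :: processed) (fun v => by
        rw [PySem.Dict.getD_insert]
        by_cases hv : v = node
        · subst hv; simp [hlst]
        · rw [if_neg hv, hrel v]; congr 1; simp [hv])]
      congr 1
      by_cases hu : u ∈ processed <;> by_cases hn : u = node <;> simp_all

-- the whole index build: each node's posting list is exactly the enumerated cycles containing it
lemma fceIndex_fold_getD (cycles : List (List Int)) (n : Nat)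
    (d : PySem.Dict Int (List (Nat × List Int)))
    (hsmall : ∀ v p, p ∈ d.getD v [] → p.1 < n) (u : Int) :
    ((cycles.foldl (fun st cyc => (st.1 + 1, fceInner st.1 cyc st.2)) (n, d)).2).getD u []
    = d.getD u [] ++ (pvEnumFrom n cycles).filter (fun p => p.2.contains u) := by
  induction cycles generalizing n d with
  | nil => simp [pvEnumFrom]
  | cons cyc cs ih =>
    simp only [List.foldl_cons]
    have hstep : ∀ v, (fceInner n cyc d).getD v []
        = d.getD v [] ++ (if v ∈ cyc then [(n, cyc)] else []) := by
      intro v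
      unfold fceInner
      simpa using fceInner_getD cyc n cyc d d [] hsmall (fun w => by simp) v
    have hsmall' : ∀ v p, p ∈ (fceInner n cyc d).getD v [] → p.1 < n + 1 := by
      intro v p hp
      rw [hstep v] at hp
      rcases List.mem_append.1 hp with h | h
      · exact Nat.lt_succ_of_lt (hsmall v p h)
      · split at h <;> simp at h
        subst h; simp
    rw [ih (n + 1) _ hsmall', hstep u, pvEnumFrom, List.filter_cons]
    by_cases hc : u ∈ cyc <;> simp [hc]

lemma fceIndex_getD (cycles : List (List Int)) (u : Int) :
    (fceIndex cycles).getD u [] = (pvEnumFrom 0 cycles).filter (fun p => p.2.contains u) := by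
  unfold fceIndex
  simpa using fceIndex_fold_getD cycles 0 PySem.Dict.empty (fun v p hp => by simp at hp) u

-- merge-intersection drops an unmatched smaller head (left / right)
lemma fceIntersect_drop_left (x : Nat × List Int) (A B : List (Nat × List Int))
    (h : ∀ y ∈ B, x.1 < y.1) : fceIntersect (x :: A) B = fceIntersect A B := by
  cases B with
  | nil => cases A <;> simp [fceIntersect]
  | cons y B =>
    obtain ⟨i, c⟩ := x; obtain ⟨j, d⟩ := y
    have hij : i < j := h (j, d) (by simp)
    rw [fceIntersect, if_neg (by omega), if_pos hij]

lemma fceIntersect_drop_right (y : Nat × List Int) (A B : List (Nat × List Int))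
    (h : ∀ x ∈ A, y.1 < x.1) : fceIntersect A (y :: B) = fceIntersect A B := by
  cases A with
  | nil => simp [fceIntersect]
  | cons x A =>
    obtain ⟨i, c⟩ := x; obtain ⟨j, d⟩ := y
    have hji : j < i := h (i, c) (by simp)
    rw [fceIntersect, if_neg (by omega), if_neg (by omega)]

-- intersecting two filters of one strictly increasing list = filtering by the conjunction
lemma fceIntersect_filter (E : List (Nat × List Int)) (p q : Nat × List Int → Bool)
    (hE : E.Pairwise (fun x y => x.1 < y.1)) :
    fceIntersect (E.filter p) (E.filter q) = (E.filter (fun x => p x && q x)).map Prod.snd := by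
  induction E with
  | nil => simp [fceIntersect]
  | cons x E ih =>
    rw [List.pairwise_cons] at hE
    obtain ⟨hlt, hE'⟩ := hE
    have hpmem : ∀ y ∈ E.filter p, x.1 < y.1 := fun y hy => hlt y (List.mem_of_mem_filter hy)
    have hqmem : ∀ y ∈ E.filter q, x.1 < y.1 := fun y hy => hlt y (List.mem_of_mem_filter hy)
    by_cases hp : p x = true <;> by_cases hq : q x = true <;>
      simp only [List.filter_cons, hp, hq, Bool.true_and, Bool.false_and,
        Bool.false_eq_true, ite_true, ite_false]
    · obtain ⟨i, c⟩ := x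
      rw [fceIntersect, if_pos rfl, ih hE']
      rfl
    · rw [fceIntersect_drop_left x _ _ hqmem, ih hE']
    · rw [fceIntersect_drop_right x _ _ hpmem, ih hE']
    · exact ih hE'

-- enumerating, filtering on the cycle, and projecting = filtering the cycles directly
lemma map_snd_filter_pvEnumFrom (n : Nat) (l : List (List Int)) (a b : Int) :
    ((pvEnumFrom n l).filter (fun x => x.2.contains a && x.2.contains b)).map Prod.snd
      = l.filter (fun c => c.contains a && c.contains b) := by
  induction l generalizing n with
  | nil => rfl
  | cons c cs ih =>
    have ih' := ih (n + 1)
    simp only [List.contains_eq_mem] at ih'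
    by_cases ha : a ∈ c <;> by_cases hb : b ∈ c <;>
      simp_all [pvEnumFrom]

-- ===== VERDICT =====
theorem find_cycles_containing_edges_spec : Claim_equal_find_cycles_containing_edges := by
  intro edges cycles _
  unfold Spec_find_cycles_containing_edges
  show find_cycles_containing_edges edges cycles = find_cycles_containing_edges_alt edges cycles
  simp only [find_cycles_containing_edges, find_cycles_containing_edges_alt,
    PySem.List.foldl_append_singleton_eq_map, PySem.List.foldl_append_if_eq_filter,
    List.nil_append]
  apply List.map_congr_left
  intro e _
  have hc : fceIntersect ((fceIndex cycles).getD e.1 []) ((fceIndex cycles).getD e.2.1 [])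
      = cycles.filter (fun cyc => cyc.contains e.1 && cyc.contains e.2.1) := by
    rw [fceIndex_getD, fceIndex_getD,
      fceIntersect_filter _ _ _ (pairwise_pvEnumFrom 0 cycles)]
    exact map_snd_filter_pvEnumFrom 0 cycles e.1 e.2.1
  rw [hc]
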